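-- pv_equiv track=rewrite | github.com/schulzrol/uni | isj/isj_proj3_xschul06.py | first_odd_or_even
-- ===== SOURCE A (Python) =====
-- def first_odd_or_even(numbers):
--     """Returns 0 if there is the same number of even numbers and odd numbers
--        in the input list of ints, or there are only odd or only even numbers.
--        Returns the first odd number in the input list if the list has more even
--        numbers.
--        Returns the first even number in the input list if the list has more odd
--        numbers.
--
--     >>> first_odd_or_even([2,4,2,3,6])
--     3
--     >>> first_odd_or_even([3,5,4])
--     4
--     >>> first_odd_or_even([2,4,3,5])
--     0
--     >>> first_odd_or_even([2,4])
--     0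
--     >>> first_odd_or_even([3])
--     0
--     """
--
--     def is_even(n):
--         return (n%2 == 0)
--
--     # +1 even, -1 odd
--     parity = sum([1 if is_even(num) else -1 for num in numbers])
--     if (parity == 0 or abs(parity) == len(numbers)):
--         # Handles first RETURNS requirement
--         return 0;
--
--     if (parity > 0): # more even
--         return [num for num in numbers if not is_even(num)][0] # return first odd
--     else: # more odd
--         return [num for num in numbers if is_even(num)][0] # return first even
-- ===== SOURCE B (Python) =====
-- def first_odd_or_even(numbers):
--     even_count = odd_count = 0
--     first_even = first_odd = None
--     for n in numbers:
--         if n % 2 == 0: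
--             if even_count == 0:
--                 first_even = n
--             even_count += 1
--         else:
--             if odd_count == 0:
--                 first_odd = n
--             odd_count += 1
--     if even_count == odd_count or even_count == 0 or odd_count == 0:
--         return 0
--     return first_odd if even_count > odd_count else first_even
-- ===== Notes on version B (the rewrite author's own statement) =====
-- stated objective: faster
-- what changed: A sums a materialized parity comprehension and then builds a second filtered list to index its first element; B makes one state-tracking pass maintaining even/odd counts and first-seen values of each parity, building no intermediate lists.
import Mathlib
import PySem

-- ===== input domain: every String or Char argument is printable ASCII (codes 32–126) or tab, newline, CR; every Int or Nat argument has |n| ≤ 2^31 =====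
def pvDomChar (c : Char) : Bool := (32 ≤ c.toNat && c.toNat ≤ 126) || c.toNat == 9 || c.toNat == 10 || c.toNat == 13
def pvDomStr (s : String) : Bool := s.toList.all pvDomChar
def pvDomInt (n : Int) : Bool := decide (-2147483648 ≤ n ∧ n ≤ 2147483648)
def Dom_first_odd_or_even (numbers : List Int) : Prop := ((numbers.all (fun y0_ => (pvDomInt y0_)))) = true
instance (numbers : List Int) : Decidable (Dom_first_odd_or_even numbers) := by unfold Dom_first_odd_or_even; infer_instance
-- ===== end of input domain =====

-- B replaces A's parity-sum comprehension plus a second filtered list indexed at [0]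
-- by one state-tracking pass (counts + first-seen value of each parity); objective: faster (constant factor, no intermediate lists).


-- ===== PORT A =====
-- is_even: n % 2 == 0; Lean's Int '%' (emod) agrees with Python '%' for the positive divisor 2, exact here.
def pvIsEven (n : Int) : Bool := n % 2 == 0

-- sum of the comprehension [1 if is_even(num) else -1 for num in numbers]
def pvParity (numbers : List Int) : Int :=
  (numbers.map (fun num => if pvIsEven num then (1 : Int) else -1)).sum

def first_odd_or_even (numbers : List Int) : Int :=
  let parity := pvParity numbers
  if parity = 0 ∨ parity.natAbs = numbers.length then 0
  else if parity > 0 then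
    -- [num for num in numbers if not is_even(num)][0]; the [0] is provably in range here (IndexError impossible), .getD 0 is unreachable
    (PySem.List.pyGet? (numbers.filter (fun num => !pvIsEven num)) 0).getD 0
  else
    (PySem.List.pyGet? (numbers.filter (fun num => pvIsEven num)) 0).getD 0

-- ===== PORT B =====
-- one pass: (even_count, odd_count, first_even, first_odd)
def pvStep (s : Int × Int × Option Int × Option Int) (n : Int) :
    Int × Int × Option Int × Option Int :=
  let (ec, oc, fe, fo) := s
  if n % 2 == 0 then
    (ec + 1, oc, if ec = 0 then some n else fe, fo)
  else
    (ec, oc + 1, fe, if oc = 0 then some n else fo)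

def first_odd_or_even_alt (numbers : List Int) : Int :=
  let st := numbers.foldl pvStep (0, 0, none, none)
  let (ec, oc, fe, fo) := st
  if ec = oc ∨ ec = 0 ∨ oc = 0 then 0
  else if ec > oc then fo.getD 0 else fe.getD 0

-- ===== PRECONDITION & SPEC =====
def Spec_first_odd_or_even (numbers : List Int) (out : Int) : Prop := out = first_odd_or_even_alt numbers
instance (numbers : List Int) (out : Int) : Decidable (Spec_first_odd_or_even numbers out) := by unfold Spec_first_odd_or_even; infer_instance

-- ===== CLAIM (what is proved, stated in full; the proofs are below) =====
def Claim_equal_first_odd_or_even : Prop := ∀ (numbers : List Int), Dom_first_odd_or_even numbers → Spec_first_odd_or_even numbers (first_odd_or_even numbers)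

-- ===== LEMMAS AND PROOFS =====

def pvCE (l : List Int) : Int := ((l.filter (fun n => pvIsEven n)).length : Int)
def pvCO (l : List Int) : Int := ((l.filter (fun n => !pvIsEven n)).length : Int)

theorem pvParity_eq (l : List Int) : pvParity l = pvCE l - pvCO l := by
  induction l with
  | nil => simp [pvParity, pvCE, pvCO]
  | cons h t ih =>
    simp only [pvParity, pvCE, pvCO, List.map_cons, List.sum_cons, List.filter_cons] at *
    by_cases he : pvIsEven h <;> simp [he] at * <;> push_cast <;> omega

theorem pvLen_split (l : List Int) : pvCE l + pvCO l = (l.length : Int) := by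
  induction l with
  | nil => simp [pvCE, pvCO]
  | cons h t ih =>
    simp only [pvCE, pvCO, List.filter_cons, List.length_cons] at *
    by_cases he : pvIsEven h <;> simp [he] at * <;> push_cast at * <;> omega

theorem pvCE_nonneg (l : List Int) : 0 ≤ pvCE l := by unfold pvCE; positivity
theorem pvCO_nonneg (l : List Int) : 0 ≤ pvCO l := by unfold pvCO; positivity

-- characterization of the fold
theorem pvFold_spec (l : List Int) : ∀ (ec oc : Int) (fe fo : Option Int), 0 ≤ ec → 0 ≤ oc →
    l.foldl pvStep (ec, oc, fe, fo) =
      (ec + pvCE l, oc + pvCO l,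
       if ec = 0 then ((l.filter (fun n => pvIsEven n)).head?).orElse (fun _ => fe) else fe,
       if oc = 0 then ((l.filter (fun n => !pvIsEven n)).head?).orElse (fun _ => fo) else fo) := by
  induction l with
  | nil => intro ec oc fe fo _ _; simp [pvCE, pvCO]
  | cons h t ih =>
    intro ec oc fe fo hec hoc
    by_cases he : pvIsEven h
    · have : (h % 2 == 0) = true := he
      rw [List.foldl_cons, pvStep, this]
      simp only [if_true]
      rw [ih (ec + 1) oc _ fo (by omega) hoc]
      simp only [pvCE, pvCO, List.filter_cons, he]
      have h1 : ¬ (ec + 1 = 0) := by omega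
      simp only [h1, if_false]
      by_cases hz : ec = 0 <;> simp [hz] <;> omega
    · have hb : (h % 2 == 0) = false := by simpa [pvIsEven] using he
      rw [List.foldl_cons, pvStep, hb]
      simp only [Bool.false_eq_true, if_false]
      rw [ih ec (oc + 1) fe _ hec (by omega)]
      simp only [pvCE, pvCO, List.filter_cons, he]
      have h1 : ¬ (oc + 1 = 0) := by omega
      simp only [h1, if_false]
      by_cases hz : oc = 0 <;> simp [hz, pvIsEven] at * <;> omega

-- ===== VERDICT (by name: the statement is the Claim_ definition above) =====
theorem first_odd_or_even_spec : Claim_equal_first_odd_or_even := by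
  intro numbers _
  unfold Spec_first_odd_or_even first_odd_or_even first_odd_or_even_alt
  rw [pvFold_spec numbers 0 0 none none le_rfl le_rfl]
  simp only [zero_add]
  have hp := pvParity_eq numbers
  have hl := pvLen_split numbers
  have hce := pvCE_nonneg numbers
  have hco := pvCO_nonneg numbers
  set CE := pvCE numbers
  set CO := pvCO numbers
  by_cases h0 : pvParity numbers = 0 ∨ (pvParity numbers).natAbs = numbers.length
  · rw [if_pos h0]
    have : CE = CO ∨ CE = 0 ∨ CO = 0 := by
      rcases h0 with h | h
      · left; omega
      · right; omega
    rw [if_pos this]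
  · rw [if_neg h0]
    push Not at h0
    have hne : ¬ (CE = CO ∨ CE = 0 ∨ CO = 0) := by
      push Not
      refine ⟨by omega, by omega, by omega⟩
    rw [if_neg hne]
    by_cases hgt : pvParity numbers > 0
    · rw [if_pos hgt, if_pos (by omega : CE > CO)]
      -- more even: first odd; the odd filter is nonempty since CO ≠ 0
      have : CO ≠ 0 := by omega
      cases hcons : numbers.filter (fun n => !pvIsEven n) with
      | nil => exfalso; apply this; simp [CO, pvCO, hcons]
      | cons a t => simp [Option.orElse]
    · rw [if_neg hgt, if_neg (by omega : ¬ CE > CO)]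
      have : CE ≠ 0 := by omega
      cases hcons : numbers.filter (fun n => pvIsEven n) with
      | nil => exfalso; apply this; simp [CE, pvCE, hcons]
      | cons a t => simp [Option.orElse]
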